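-- pv_equiv track=rewrite | github.com/VoropaevIvan/EGE | Шаблоны/№ 15/дел + нер.py | check
-- ===== SOURCE A (Python) =====
-- def check(A):
--     for x in range(1, 10 ** 6):
--         x_6 = (x % 6 == 0)
--         x_10 = (x % 10 == 0)
--         f = (x_6 <= (not x_10)) or (x + A > 121)
--         if f != 1:
--             return 0
--     return 1
-- ===== SOURCE B (Python) =====
-- def check(A):
--     # The only x in [1, 10**6) violating (x%6==0 -> x%10!=0) are multiples of 30;
--     # the smallest is 30, so the whole range passes iff 30 + A > 121, i.e. A > 91.
--     return 1 if A > 91 else 0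
-- ===== Notes on version B (the rewrite author's own statement) =====
-- stated objective: faster
-- what changed: Replaced the million-iteration scan with the closed form: the first (and smallest) failing x is 30, so the loop returns 0 exactly when A <= 91; B returns 1 iff A > 91.
import Mathlib
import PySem

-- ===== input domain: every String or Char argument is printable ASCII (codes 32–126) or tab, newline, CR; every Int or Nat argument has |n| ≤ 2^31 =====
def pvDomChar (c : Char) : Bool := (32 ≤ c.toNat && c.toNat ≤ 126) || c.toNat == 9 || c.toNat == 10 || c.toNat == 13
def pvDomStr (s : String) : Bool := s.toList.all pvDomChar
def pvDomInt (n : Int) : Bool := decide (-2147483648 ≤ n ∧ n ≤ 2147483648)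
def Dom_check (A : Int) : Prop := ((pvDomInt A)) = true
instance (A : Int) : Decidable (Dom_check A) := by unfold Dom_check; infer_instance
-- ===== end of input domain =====

-- B replaces A's O(10^6) scan by the closed form A > 91 (smallest failing x is 30); objective: faster.

-- ===== PORT A =====
-- the loop body's boolean f for a given x
def checkF (A x : Int) : Bool :=
  let x6 : Bool := PySem.Int.mod x 6 == 0
  let x10 : Bool := PySem.Int.mod x 10 == 0
  (decide (x6 ≤ !x10)) || decide (x + A > 121)

-- the for-loop with its early return
def checkLoop (A : Int) : List Int → Int
  | [] => 1
  | x :: rest => if checkF A x = false then 0 else checkLoop A rest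

def check (A : Int) : Int := checkLoop A (PySem.List.pyRange 1 (10 ^ 6) 1)

-- ===== PORT B =====
def check_alt (A : Int) : Int := if A > 91 then 1 else 0

-- ===== PRECONDITION & SPEC =====
def Spec_check (A : Int) (out : Int) : Prop := out = check_alt A
instance (A : Int) (out : Int) : Decidable (Spec_check A out) := by unfold Spec_check; infer_instance

-- ===== CLAIM (what is proved, stated in full; the proofs are below) =====
def Claim_equal_check : Prop := ∀ (A : Int), Dom_check A → Spec_check A (check A)

-- ===== LEMMAS AND PROOFS =====

lemma checkF_of_not30 {A x : Int} (h : ¬ (x % 6 = 0 ∧ x % 10 = 0)) : checkF A x = true := by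
  by_cases h6 : x % 6 = 0
  · have h10 : ¬ x % 10 = 0 := fun h10 => h ⟨h6, h10⟩
    have e10 : (x % 10 == 0) = false := beq_eq_false_iff_ne.mpr h10
    simp [checkF, PySem.Int.mod_eq_emod_of_pos (by norm_num : (0:Int) < 10), e10]
  · have e6 : (x % 6 == 0) = false := beq_eq_false_iff_ne.mpr h6
    simp [checkF, PySem.Int.mod_eq_emod_of_pos (by norm_num : (0:Int) < 6), e6]

lemma checkF_of_big {A x : Int} (hx : 1 ≤ x) (hA : 91 < A) : checkF A x = true := by
  by_cases h : x % 6 = 0 ∧ x % 10 = 0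
  · have : 30 ≤ x := by omega
    simp only [checkF]
    have : x + A > 121 := by omega
    simp [this]
  · exact checkF_of_not30 h

lemma checkF_30_of_small {A : Int} (hA : A ≤ 91) : checkF A 30 = false := by
  simp [checkF, PySem.Int.mod_eq_emod_of_pos (by norm_num : (0:Int) < 6),
    PySem.Int.mod_eq_emod_of_pos (by norm_num : (0:Int) < 10)]
  omega

lemma checkLoop_all {A : Int} : ∀ l : List Int, (∀ x ∈ l, checkF A x = true) → checkLoop A l = 1 := by
  intro l h
  induction l with
  | nil => rfl
  | cons x rest ih =>
    have hx := h x (List.mem_cons_self ..)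
    simp only [checkLoop, hx]
    simpa using ih fun y hy => h y (List.mem_cons_of_mem _ hy)

lemma checkLoop_append_all {A : Int} (l1 l2 : List Int) (h : ∀ x ∈ l1, checkF A x = true) :
    checkLoop A (l1 ++ l2) = checkLoop A l2 := by
  induction l1 with
  | nil => rfl
  | cons x rest ih =>
    have hx := h x (List.mem_cons_self ..)
    simp only [List.cons_append, checkLoop, hx]
    simpa using ih fun y hy => h y (List.mem_cons_of_mem _ hy)

theorem check_spec : Claim_equal_check := by
  intro A _
  unfold Spec_check check check_alt
  by_cases hA : 91 < A
  · rw [checkLoop_all _ (fun x hx => by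
      have := (PySem.List.mem_pyRange_one).1 hx
      exact checkF_of_big this.1 hA)]
    simp [hA]
  · rw [not_lt] at hA
    have hsplit : PySem.List.pyRange 1 (10 ^ 6) 1 =
        PySem.List.pyRange 1 30 1 ++ PySem.List.pyRange 30 (10 ^ 6) 1 :=
      PySem.List.pyRange_one_append 1 30 (10 ^ 6) (by norm_num) (by norm_num)
    rw [hsplit, checkLoop_append_all _ _ (fun x hx => by
      have hb := (PySem.List.mem_pyRange_one).1 hx
      exact checkF_of_not30 (by omega))]
    rw [PySem.List.pyRange_one_cons (by norm_num)]
    simp [checkLoop, checkF_30_of_small hA, hA]
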